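-- pv_equiv track=rewrite | github.com/dobermanch/dev-quests | src/python/problems/is_path_crossing_test.py | Solution
-- ===== SOURCE A (Python) =====
-- def Solution(path: str) -> bool:
--     point = (0, 0)
--
--     visited = set()
--     visited.add(point)
--
--     for direction in path:
--         if direction == 'N':
--             point = (point[0], point[1] + 1)
--         elif direction == 'S':
--             point = (point[0], point[1] - 1)
--         elif direction == 'E':
--             point = (point[0] + 1, point[1])
--         elif direction == 'W':
--             point = (point[0] - 1, point[1])
--
--         if point in visited:
--             return True
--         visited.add(point)
--
--     return False
-- ===== SOURCE B (Python) =====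
-- def Solution(path: str) -> bool:
--     deltas = {'N': (0, 1), 'S': (0, -1), 'E': (1, 0), 'W': (-1, 0)}
--     x, y = 0, 0
--     positions = [(0, 0)]
--     for d in path:
--         dx, dy = deltas.get(d, (0, 0))
--         x, y = x + dx, y + dy
--         positions.append((x, y))
--     positions.sort()
--     return any(p == q for p, q in zip(positions, positions[1:]))
-- ===== Notes on version B (the rewrite author's own statement) =====
-- stated objective: alternative
-- what changed: B uses no set at all: it builds the whole trajectory with a delta table, sorts it lexicographically and decides the result by scanning adjacent sorted pairs for an equal pair, instead of A's incremental visited-set membership check with early return.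
import Mathlib
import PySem

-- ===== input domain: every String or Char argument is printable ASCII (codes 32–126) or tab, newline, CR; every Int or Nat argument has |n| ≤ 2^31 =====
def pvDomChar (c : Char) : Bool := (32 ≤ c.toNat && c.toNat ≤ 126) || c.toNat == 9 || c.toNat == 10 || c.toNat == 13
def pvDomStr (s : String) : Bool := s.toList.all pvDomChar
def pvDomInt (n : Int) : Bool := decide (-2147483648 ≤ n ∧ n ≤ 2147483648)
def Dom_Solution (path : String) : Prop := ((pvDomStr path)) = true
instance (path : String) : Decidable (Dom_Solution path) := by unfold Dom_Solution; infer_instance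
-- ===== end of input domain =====

-- B uses no visited set: it builds the full trajectory via a delta table, sorts it
-- lexicographically and scans adjacent sorted pairs for an equal pair; same result as A.

-- ===== PORT A =====
def stepA (c : Char) (p : Int × Int) : Int × Int :=
  if c = 'N' then (p.1, p.2 + 1)
  else if c = 'S' then (p.1, p.2 - 1)
  else if c = 'E' then (p.1 + 1, p.2)
  else if c = 'W' then (p.1 - 1, p.2)
  else p

def loopA : List Char → (Int × Int) → PySem.Set (Int × Int) → Bool
  | [], _, _ => false
  | c :: cs, p, v =>
    let p' := stepA c p
    if PySem.Set.contains v p' then true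
    else loopA cs p' (PySem.Set.add v p')

def Solution (path : String) : Bool :=
  loopA path.toList (0, 0) (PySem.Set.add PySem.Set.empty (0, 0))

-- ===== PORT B =====
def deltaB (c : Char) : Int × Int :=
  PySem.Dict.getD
    (PySem.Dict.mk [('N', ((0 : Int), (1 : Int))), ('S', (0, -1)), ('E', (1, 0)), ('W', (-1, 0))])
    c (0, 0)

def Solution_alt (path : String) : Bool :=
  let st := path.toList.foldl
    (fun (s : (Int × Int) × List (Int × Int)) c =>
      let d := deltaB c
      let p := (s.1.1 + d.1, s.1.2 + d.2)
      (p, s.2 ++ [p]))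
    (((0 : Int), (0 : Int)), [((0 : Int), (0 : Int))])
  -- positions.sort(): Python sorts int pairs lexicographically = the Lex order on Int × Int
  let s := PySem.List.sorted st.2 (fun p => toLex p) false
  (s.zip s.tail).any (fun pq => pq.1 == pq.2)

-- ===== PRECONDITION & SPEC =====
def Spec_Solution (path : String) (out : Bool) : Prop := out = Solution_alt path
instance (path : String) (out : Bool) : Decidable (Spec_Solution path out) := by unfold Spec_Solution; infer_instance

-- ===== CLAIM (what is proved, stated in full; the proofs are below) =====
def Claim_equal_Solution : Prop := ∀ (path : String), Dom_Solution path → Spec_Solution path (Solution path)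

-- ===== LEMMAS AND PROOFS =====

-- the trajectory after the start point
def traj : (Int × Int) → List Char → List (Int × Int)
  | _, [] => []
  | p, c :: cs => stepA c p :: traj (stepA c p) cs

theorem deltaB_other (c : Char) (hN : c ≠ 'N') (hS : c ≠ 'S') (hE : c ≠ 'E') (hW : c ≠ 'W') :
    deltaB c = (0, 0) := by
  simp [deltaB, PySem.Dict.getD_eq_get?_getD,
    Ne.symm hN, Ne.symm hS, Ne.symm hE, Ne.symm hW, PySem.Dict.get?]

theorem stepA_eq_delta (c : Char) (p : Int × Int) :
    stepA c p = (p.1 + (deltaB c).1, p.2 + (deltaB c).2) := by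
  by_cases hN : c = 'N'
  · subst hN; rw [show deltaB 'N' = (0, 1) from by decide]; simp [stepA]
  by_cases hS : c = 'S'
  · subst hS; rw [show deltaB 'S' = (0, -1) from by decide]; simp [stepA]; ring
  by_cases hE : c = 'E'
  · subst hE; rw [show deltaB 'E' = (1, 0) from by decide]; simp [stepA, hN, hS]
  by_cases hW : c = 'W'
  · subst hW; rw [show deltaB 'W' = (-1, 0) from by decide]; simp [stepA, hN, hS]; ring
  · rw [deltaB_other c hN hS hE hW]; simp [stepA, hN, hS, hE, hW]

theorem foldB_snd (cs : List Char) : ∀ (p : Int × Int) (acc : List (Int × Int)),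
    (cs.foldl
      (fun (s : (Int × Int) × List (Int × Int)) c =>
        let d := deltaB c
        let p := (s.1.1 + d.1, s.1.2 + d.2)
        (p, s.2 ++ [p])) (p, acc)).2 = acc ++ traj p cs := by
  induction cs with
  | nil => intro p acc; simp [traj]
  | cons c cs ih =>
    intro p acc
    simp only [List.foldl_cons, traj, ← stepA_eq_delta c p, ih, List.append_assoc,
      List.singleton_append]

theorem loopA_iff (cs : List Char) : ∀ (p : Int × Int) (v : List (Int × Int)), v.Nodup →
    (loopA cs p v = true ↔ ¬ (v ++ traj p cs).Nodup) := by
  induction cs with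
  | nil => intro p v hv; simp [loopA, traj, hv]
  | cons c cs ih =>
    intro p v hv
    by_cases hmem : stepA c p ∈ v
    · have ht : loopA (c :: cs) p v = true := by
        simp [loopA, hmem]
      rw [ht]
      simp only [true_iff, traj]
      intro hnd
      rcases List.nodup_append.mp hnd with ⟨_, _, hdisj⟩
      exact hdisj _ hmem (stepA c p) (List.mem_cons_self) rfl
    · have hstep : loopA (c :: cs) p v = loopA cs (stepA c p) (PySem.Set.add v (stepA c p)) := by
        simp [loopA, hmem]
      rw [hstep, PySem.Set.add_of_not_mem hmem]
      have hnd' : (v ++ [stepA c p]).Nodup := by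
        rw [List.nodup_append]
        refine ⟨hv, List.nodup_singleton _, ?_⟩
        intro a ha b hb
        simp only [List.mem_singleton] at hb
        subst hb
        intro h; subst h; exact hmem ha
      rw [ih (stepA c p) (v ++ [stepA c p]) hnd']
      simp [traj, List.append_assoc]

-- in a list sorted under an injective key, an adjacent equal pair exists iff there is any duplicate
theorem adj_any_iff (s : List (Int × Int))
    (h : s.Pairwise (fun a b => toLex a ≤ toLex b)) :
    ((s.zip s.tail).any (fun pq => pq.1 == pq.2) = true ↔ ¬ s.Nodup) := by
  induction s with
  | nil => simp
  | cons a t ih =>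
    cases t with
    | nil => simp
    | cons b u =>
      rcases List.pairwise_cons.mp h with ⟨hab, htail⟩
      by_cases heq : a = b
      · subst heq
        simp [List.any_cons]
      · have hrec := ih htail
        have hstep : ((a :: b :: u).zip (a :: b :: u).tail).any (fun pq => pq.1 == pq.2)
            = ((b :: u).zip (b :: u).tail).any (fun pq => pq.1 == pq.2) := by
          simp [List.any_cons, heq]
        rw [hstep, hrec]
        have hnotmem : (b :: u).Nodup → a ∉ b :: u := by
          intro hnd hmem
          rcases List.mem_cons.mp hmem with h1 | h2
          · exact heq h1
          · rcases List.pairwise_cons.mp htail with ⟨hbu, _⟩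
            have h1 : toLex a ≤ toLex b := hab b (List.mem_cons_self)
            have h2' : toLex b ≤ toLex a := hbu a h2
            have : toLex a = toLex b := le_antisymm h1 h2'
            exact heq (toLex.injective this)
        constructor
        · intro hn hnd
          exact hn (List.Nodup.of_cons hnd)
        · intro hn hnd
          exact hn (List.nodup_cons.mpr ⟨hnotmem hnd, hnd⟩)

-- ===== VERDICT (by name: the statement is the Claim_ definition above) =====
theorem Solution_spec : Claim_equal_Solution := by
  intro path _
  unfold Spec_Solution Solution Solution_alt
  simp only [foldB_snd]
  have hstart : PySem.Set.add PySem.Set.empty ((0 : Int), (0 : Int)) = [((0 : Int), (0 : Int))] := by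
    decide
  have hperm := PySem.List.sorted_perm
    ([((0 : Int), (0 : Int))] ++ traj (0, 0) path.toList) (fun p => toLex p) false
  rw [hstart, Bool.eq_iff_iff,
    loopA_iff path.toList (0, 0) [((0 : Int), (0 : Int))] (List.nodup_singleton _),
    adj_any_iff _ (PySem.List.sorted_pairwise _ _), hperm.nodup_iff]
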